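-- pv_equiv track=rewrite | github.com/loopback-kr/hwp-key-converter | main.py | ecd2pid
-- ===== SOURCE A (Python) =====
-- def ecd2pid(ecd : str):
--     hashtab = {
--         # dst_block, digit_stride, char_stride
--         0 : (1, 1, 1),
--         1 : (3, 1, 17),
--         2 : (0, 7, 23),
--         3 : (2, 2, 2),
--     }
--
--     pidkey = ['' for _ in range(len(hashtab))]
--     for i, c in enumerate(ecd):
--         block_num = i // 5
--
--         sub = ord(c) - hashtab[block_num][1 if c.isdigit() else 2]
--         if sub < (48 if c.isdigit() else 65):
--             sub += 10 if c.isdigit() else 26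
--         pidkey[hashtab[block_num][0]] += (chr(sub))
--     return '-'.join(pidkey)
-- ===== SOURCE B (Python) =====
-- def ecd2pid(ecd: str):
--     tab = [
--         # dst_block, digit_stride, char_stride
--         (1, 1, 1),
--         (3, 1, 17),
--         (0, 7, 23),
--         (2, 2, 2),
--     ]
--
--     parts = ['', '', '', '']
--     for b, start in enumerate(range(0, len(ecd), 5)):
--         dst, dstride, cstride = tab[b]  # IndexError for b >= 4, like A's KeyError
--
--         def shift(c):
--             if c.isdigit():
--                 sub = ord(c) - dstride
--                 if sub < 48:
--                     sub += 10
--             else: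
--                 sub = ord(c) - cstride
--                 if sub < 65:
--                     sub += 26
--             return chr(sub)
--
--         parts[dst] = ''.join(shift(c) for c in ecd[start:start+5])
--     return '-'.join(parts)
-- ===== Notes on version B (the rewrite author's own statement) =====
-- stated objective: alternative
-- what changed: Replaces A's per-character loop (which recomputes i//5 and a dict lookup for every character and appends char by char to the destination slot) with a loop over 5-character blocks that fetches each block's (dst, strides) triple once from a list and fills the whole destination slot in a single assignment from a slice.
import Mathlib
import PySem

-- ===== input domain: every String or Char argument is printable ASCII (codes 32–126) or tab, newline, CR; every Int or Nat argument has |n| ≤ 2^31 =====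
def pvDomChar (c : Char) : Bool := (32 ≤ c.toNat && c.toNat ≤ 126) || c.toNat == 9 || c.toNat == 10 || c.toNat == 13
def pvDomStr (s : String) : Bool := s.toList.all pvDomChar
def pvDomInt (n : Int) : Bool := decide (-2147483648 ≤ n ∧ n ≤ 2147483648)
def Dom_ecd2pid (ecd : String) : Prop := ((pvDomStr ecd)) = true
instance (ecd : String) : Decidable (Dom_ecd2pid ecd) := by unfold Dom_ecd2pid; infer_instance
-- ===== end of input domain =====

-- B regroups A's per-character loop (dict lookup + i//5 each char) into a loop over 5-char blocks
-- that builds each destination slot in one assignment; objective: alternative decomposition, same cost.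


-- ===== PORT A =====
-- hashtab literal of A (insertion order)
def pvHashtab : PySem.Dict Int (Int × Int × Int) :=
  ((((PySem.Dict.empty).insert 0 (1, 1, 1)).insert 1 (3, 1, 17)).insert 2 (0, 7, 23)).insert 3 (2, 2, 2)

def ecd2pid (ecd : String) : String :=
  -- pidkey = ['' for _ in range(len(hashtab))]; strings kept as List Char (PySem string domain)
  let pidkey : List (List Char) := [[], [], [], []]
  let pidkey := (PySem.List.enumerate ecd.toList).foldl
    (fun pidkey ic =>
      let i := ic.1
      let c := ic.2
      let blockNum := PySem.Int.floordiv i 5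
      -- hashtab[block_num]: KeyError when block_num ≥ 4; those inputs are excluded by Pre_ecd2pid
      let t := (pvHashtab.get? blockNum).getD (0, 0, 0)
      let sub := (c.toNat : Int) - (if PySem.Chars.isdigit c then t.2.1 else t.2.2)
      let sub := if sub < (if PySem.Chars.isdigit c then 48 else 65)
                 then sub + (if PySem.Chars.isdigit c then 10 else 26) else sub
      -- chr(sub): exact here, sub is always in range on the admitted inputs
      pidkey.set t.1.toNat ((pidkey.getD t.1.toNat []) ++ [Char.ofNat sub.toNat]))
    pidkey
  PySem.Str.join "-" (pidkey.map fun cs => String.ofList cs)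

-- ===== PORT B =====
def pvTab : List (Int × Int × Int) :=
  [(1, 1, 1), (3, 1, 17), (0, 7, 23), (2, 2, 2)]

-- the nested 'shift' helper of B
def pvShift (dstride cstride : Int) (c : Char) : Char :=
  if PySem.Chars.isdigit c then
    let sub := (c.toNat : Int) - dstride
    let sub := if sub < 48 then sub + 10 else sub
    Char.ofNat sub.toNat  -- chr(sub): exact, sub in range on the admitted inputs
  else
    let sub := (c.toNat : Int) - cstride
    let sub := if sub < 65 then sub + 26 else sub
    Char.ofNat sub.toNat

def ecd2pid_alt (ecd : String) : String :=
  let l := ecd.toList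
  let parts : List (List Char) := [[], [], [], []]
  let parts := (PySem.List.enumerate (PySem.List.pyRange 0 (l.length : Int) 5)).foldl
    (fun parts bs =>
      let b := bs.1
      let start := bs.2
      -- tab[b]: IndexError when b ≥ 4; those inputs are excluded by Pre_ecd2pid
      let t := (PySem.List.pyGet? pvTab b).getD (0, 0, 0)
      parts.set t.1.toNat ((PySem.List.slice l (some start) (some (start + 5))).map (pvShift t.2.1 t.2.2)))
    parts
  PySem.Str.join "-" (parts.map fun cs => String.ofList cs)

-- ===== PRECONDITION & SPEC =====
-- Pre_ excludes exactly the inputs of length > 20, on which A raises KeyError (block_num ≥ 4).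
def Pre_ecd2pid (ecd : String) : Prop := ecd.toList.length ≤ 20
instance (ecd : String) : Decidable (Pre_ecd2pid ecd) := by unfold Pre_ecd2pid; infer_instance
def pvWitness_ecd2pid : String := "ABCDE12345FGHIJ67890"

def Spec_ecd2pid (ecd : String) (out : String) : Prop := out = ecd2pid_alt ecd
instance (ecd : String) (out : String) : Decidable (Spec_ecd2pid ecd out) := by unfold Spec_ecd2pid; infer_instance

-- ===== CLAIM (what is proved, stated in full; the proofs are below) =====
def Claim_equal_ecd2pid : Prop := ∀ (ecd : String), Dom_ecd2pid ecd → Pre_ecd2pid ecd → Spec_ecd2pid ecd (ecd2pid ecd)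

-- ===== LEMMAS AND PROOFS =====

theorem pvShift_eq (d s : Int) (c : Char) :
  Char.ofNat (if ((c.toNat:Int) - (if PySem.Chars.isdigit c then d else s)) < (if PySem.Chars.isdigit c then 48 else 65)
     then ((c.toNat:Int) - (if PySem.Chars.isdigit c then d else s)) + (if PySem.Chars.isdigit c then 10 else 26)
     else ((c.toNat:Int) - (if PySem.Chars.isdigit c then d else s))).toNat
  = pvShift d s c := by
  unfold pvShift; by_cases h : PySem.Chars.isdigit c <;> simp [h]

theorem pvCase0 :
    ecd2pid (String.ofList []) = ecd2pid_alt (String.ofList []) := by decide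

theorem pvCase1 (c1 : Char) :
    ecd2pid (String.ofList [c1]) = ecd2pid_alt (String.ofList [c1]) := by
  have hr : PySem.List.pyRange 0 (1 : Int) 5 = [0] := by decide
  simp [ecd2pid, ecd2pid_alt, pvHashtab, pvTab, hr, PySem.List.enumerate_cons, PySem.List.enumerate_nil,
    PySem.Int.floordiv, PySem.Dict.get?, PySem.Dict.insert, PySem.Dict.empty, PySem.List.pyGet?,
    PySem.List.pyIdx?, PySem.List.slice, PySem.List.clampIdx, pvShift_eq]

theorem pvCase2 (c1 c2 : Char) :
    ecd2pid (String.ofList [c1, c2]) = ecd2pid_alt (String.ofList [c1, c2]) := by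
  have hr : PySem.List.pyRange 0 (2 : Int) 5 = [0] := by decide
  simp [ecd2pid, ecd2pid_alt, pvHashtab, pvTab, hr, PySem.List.enumerate_cons, PySem.List.enumerate_nil,
    PySem.Int.floordiv, PySem.Dict.get?, PySem.Dict.insert, PySem.Dict.empty, PySem.List.pyGet?,
    PySem.List.pyIdx?, PySem.List.slice, PySem.List.clampIdx, pvShift_eq]

theorem pvCase3 (c1 c2 c3 : Char) :
    ecd2pid (String.ofList [c1, c2, c3]) = ecd2pid_alt (String.ofList [c1, c2, c3]) := by
  have hr : PySem.List.pyRange 0 (3 : Int) 5 = [0] := by decide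
  simp [ecd2pid, ecd2pid_alt, pvHashtab, pvTab, hr, PySem.List.enumerate_cons, PySem.List.enumerate_nil,
    PySem.Int.floordiv, PySem.Dict.get?, PySem.Dict.insert, PySem.Dict.empty, PySem.List.pyGet?,
    PySem.List.pyIdx?, PySem.List.slice, PySem.List.clampIdx, pvShift_eq]

theorem pvCase4 (c1 c2 c3 c4 : Char) :
    ecd2pid (String.ofList [c1, c2, c3, c4]) = ecd2pid_alt (String.ofList [c1, c2, c3, c4]) := by
  have hr : PySem.List.pyRange 0 (4 : Int) 5 = [0] := by decide
  simp [ecd2pid, ecd2pid_alt, pvHashtab, pvTab, hr, PySem.List.enumerate_cons, PySem.List.enumerate_nil,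
    PySem.Int.floordiv, PySem.Dict.get?, PySem.Dict.insert, PySem.Dict.empty, PySem.List.pyGet?,
    PySem.List.pyIdx?, PySem.List.slice, PySem.List.clampIdx, pvShift_eq]

theorem pvCase5 (c1 c2 c3 c4 c5 : Char) :
    ecd2pid (String.ofList [c1, c2, c3, c4, c5]) = ecd2pid_alt (String.ofList [c1, c2, c3, c4, c5]) := by
  have hr : PySem.List.pyRange 0 (5 : Int) 5 = [0] := by decide
  simp [ecd2pid, ecd2pid_alt, pvHashtab, pvTab, hr, PySem.List.enumerate_cons, PySem.List.enumerate_nil,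
    PySem.Int.floordiv, PySem.Dict.get?, PySem.Dict.insert, PySem.Dict.empty, PySem.List.pyGet?,
    PySem.List.pyIdx?, PySem.List.slice, PySem.List.clampIdx, pvShift_eq]

theorem pvCase6 (c1 c2 c3 c4 c5 c6 : Char) :
    ecd2pid (String.ofList [c1, c2, c3, c4, c5, c6]) = ecd2pid_alt (String.ofList [c1, c2, c3, c4, c5, c6]) := by
  have hr : PySem.List.pyRange 0 (6 : Int) 5 = [0, 5] := by decide
  simp [ecd2pid, ecd2pid_alt, pvHashtab, pvTab, hr, PySem.List.enumerate_cons, PySem.List.enumerate_nil,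
    PySem.Int.floordiv, PySem.Dict.get?, PySem.Dict.insert, PySem.Dict.empty, PySem.List.pyGet?,
    PySem.List.pyIdx?, PySem.List.slice, PySem.List.clampIdx, pvShift_eq]

theorem pvCase7 (c1 c2 c3 c4 c5 c6 c7 : Char) :
    ecd2pid (String.ofList [c1, c2, c3, c4, c5, c6, c7]) = ecd2pid_alt (String.ofList [c1, c2, c3, c4, c5, c6, c7]) := by
  have hr : PySem.List.pyRange 0 (7 : Int) 5 = [0, 5] := by decide
  simp [ecd2pid, ecd2pid_alt, pvHashtab, pvTab, hr, PySem.List.enumerate_cons, PySem.List.enumerate_nil,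
    PySem.Int.floordiv, PySem.Dict.get?, PySem.Dict.insert, PySem.Dict.empty, PySem.List.pyGet?,
    PySem.List.pyIdx?, PySem.List.slice, PySem.List.clampIdx, pvShift_eq]

theorem pvCase8 (c1 c2 c3 c4 c5 c6 c7 c8 : Char) :
    ecd2pid (String.ofList [c1, c2, c3, c4, c5, c6, c7, c8]) = ecd2pid_alt (String.ofList [c1, c2, c3, c4, c5, c6, c7, c8]) := by
  have hr : PySem.List.pyRange 0 (8 : Int) 5 = [0, 5] := by decide
  simp [ecd2pid, ecd2pid_alt, pvHashtab, pvTab, hr, PySem.List.enumerate_cons, PySem.List.enumerate_nil,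
    PySem.Int.floordiv, PySem.Dict.get?, PySem.Dict.insert, PySem.Dict.empty, PySem.List.pyGet?,
    PySem.List.pyIdx?, PySem.List.slice, PySem.List.clampIdx, pvShift_eq]

theorem pvCase9 (c1 c2 c3 c4 c5 c6 c7 c8 c9 : Char) :
    ecd2pid (String.ofList [c1, c2, c3, c4, c5, c6, c7, c8, c9]) = ecd2pid_alt (String.ofList [c1, c2, c3, c4, c5, c6, c7, c8, c9]) := by
  have hr : PySem.List.pyRange 0 (9 : Int) 5 = [0, 5] := by decide
  simp [ecd2pid, ecd2pid_alt, pvHashtab, pvTab, hr, PySem.List.enumerate_cons, PySem.List.enumerate_nil,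
    PySem.Int.floordiv, PySem.Dict.get?, PySem.Dict.insert, PySem.Dict.empty, PySem.List.pyGet?,
    PySem.List.pyIdx?, PySem.List.slice, PySem.List.clampIdx, pvShift_eq]

theorem pvCase10 (c1 c2 c3 c4 c5 c6 c7 c8 c9 c10 : Char) :
    ecd2pid (String.ofList [c1, c2, c3, c4, c5, c6, c7, c8, c9, c10]) = ecd2pid_alt (String.ofList [c1, c2, c3, c4, c5, c6, c7, c8, c9, c10]) := by
  have hr : PySem.List.pyRange 0 (10 : Int) 5 = [0, 5] := by decide
  simp [ecd2pid, ecd2pid_alt, pvHashtab, pvTab, hr, PySem.List.enumerate_cons, PySem.List.enumerate_nil,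
    PySem.Int.floordiv, PySem.Dict.get?, PySem.Dict.insert, PySem.Dict.empty, PySem.List.pyGet?,
    PySem.List.pyIdx?, PySem.List.slice, PySem.List.clampIdx, pvShift_eq]

theorem pvCase11 (c1 c2 c3 c4 c5 c6 c7 c8 c9 c10 c11 : Char) :
    ecd2pid (String.ofList [c1, c2, c3, c4, c5, c6, c7, c8, c9, c10, c11]) = ecd2pid_alt (String.ofList [c1, c2, c3, c4, c5, c6, c7, c8, c9, c10, c11]) := by
  have hr : PySem.List.pyRange 0 (11 : Int) 5 = [0, 5, 10] := by decide
  simp [ecd2pid, ecd2pid_alt, pvHashtab, pvTab, hr, PySem.List.enumerate_cons, PySem.List.enumerate_nil,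
    PySem.Int.floordiv, PySem.Dict.get?, PySem.Dict.insert, PySem.Dict.empty, PySem.List.pyGet?,
    PySem.List.pyIdx?, PySem.List.slice, PySem.List.clampIdx, pvShift_eq]

theorem pvCase12 (c1 c2 c3 c4 c5 c6 c7 c8 c9 c10 c11 c12 : Char) :
    ecd2pid (String.ofList [c1, c2, c3, c4, c5, c6, c7, c8, c9, c10, c11, c12]) = ecd2pid_alt (String.ofList [c1, c2, c3, c4, c5, c6, c7, c8, c9, c10, c11, c12]) := by
  have hr : PySem.List.pyRange 0 (12 : Int) 5 = [0, 5, 10] := by decide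
  simp [ecd2pid, ecd2pid_alt, pvHashtab, pvTab, hr, PySem.List.enumerate_cons, PySem.List.enumerate_nil,
    PySem.Int.floordiv, PySem.Dict.get?, PySem.Dict.insert, PySem.Dict.empty, PySem.List.pyGet?,
    PySem.List.pyIdx?, PySem.List.slice, PySem.List.clampIdx, pvShift_eq]

theorem pvCase13 (c1 c2 c3 c4 c5 c6 c7 c8 c9 c10 c11 c12 c13 : Char) :
    ecd2pid (String.ofList [c1, c2, c3, c4, c5, c6, c7, c8, c9, c10, c11, c12, c13]) = ecd2pid_alt (String.ofList [c1, c2, c3, c4, c5, c6, c7, c8, c9, c10, c11, c12, c13]) := by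
  have hr : PySem.List.pyRange 0 (13 : Int) 5 = [0, 5, 10] := by decide
  simp [ecd2pid, ecd2pid_alt, pvHashtab, pvTab, hr, PySem.List.enumerate_cons, PySem.List.enumerate_nil,
    PySem.Int.floordiv, PySem.Dict.get?, PySem.Dict.insert, PySem.Dict.empty, PySem.List.pyGet?,
    PySem.List.pyIdx?, PySem.List.slice, PySem.List.clampIdx, pvShift_eq]

theorem pvCase14 (c1 c2 c3 c4 c5 c6 c7 c8 c9 c10 c11 c12 c13 c14 : Char) :
    ecd2pid (String.ofList [c1, c2, c3, c4, c5, c6, c7, c8, c9, c10, c11, c12, c13, c14]) = ecd2pid_alt (String.ofList [c1, c2, c3, c4, c5, c6, c7, c8, c9, c10, c11, c12, c13, c14]) := by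
  have hr : PySem.List.pyRange 0 (14 : Int) 5 = [0, 5, 10] := by decide
  simp [ecd2pid, ecd2pid_alt, pvHashtab, pvTab, hr, PySem.List.enumerate_cons, PySem.List.enumerate_nil,
    PySem.Int.floordiv, PySem.Dict.get?, PySem.Dict.insert, PySem.Dict.empty, PySem.List.pyGet?,
    PySem.List.pyIdx?, PySem.List.slice, PySem.List.clampIdx, pvShift_eq]

theorem pvCase15 (c1 c2 c3 c4 c5 c6 c7 c8 c9 c10 c11 c12 c13 c14 c15 : Char) :
    ecd2pid (String.ofList [c1, c2, c3, c4, c5, c6, c7, c8, c9, c10, c11, c12, c13, c14, c15]) = ecd2pid_alt (String.ofList [c1, c2, c3, c4, c5, c6, c7, c8, c9, c10, c11, c12, c13, c14, c15]) := by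
  have hr : PySem.List.pyRange 0 (15 : Int) 5 = [0, 5, 10] := by decide
  simp [ecd2pid, ecd2pid_alt, pvHashtab, pvTab, hr, PySem.List.enumerate_cons, PySem.List.enumerate_nil,
    PySem.Int.floordiv, PySem.Dict.get?, PySem.Dict.insert, PySem.Dict.empty, PySem.List.pyGet?,
    PySem.List.pyIdx?, PySem.List.slice, PySem.List.clampIdx, pvShift_eq]

theorem pvCase16 (c1 c2 c3 c4 c5 c6 c7 c8 c9 c10 c11 c12 c13 c14 c15 c16 : Char) :
    ecd2pid (String.ofList [c1, c2, c3, c4, c5, c6, c7, c8, c9, c10, c11, c12, c13, c14, c15, c16]) = ecd2pid_alt (String.ofList [c1, c2, c3, c4, c5, c6, c7, c8, c9, c10, c11, c12, c13, c14, c15, c16]) := by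
  have hr : PySem.List.pyRange 0 (16 : Int) 5 = [0, 5, 10, 15] := by decide
  simp [ecd2pid, ecd2pid_alt, pvHashtab, pvTab, hr, PySem.List.enumerate_cons, PySem.List.enumerate_nil,
    PySem.Int.floordiv, PySem.Dict.get?, PySem.Dict.insert, PySem.Dict.empty, PySem.List.pyGet?,
    PySem.List.pyIdx?, PySem.List.slice, PySem.List.clampIdx, pvShift_eq]

theorem pvCase17 (c1 c2 c3 c4 c5 c6 c7 c8 c9 c10 c11 c12 c13 c14 c15 c16 c17 : Char) :
    ecd2pid (String.ofList [c1, c2, c3, c4, c5, c6, c7, c8, c9, c10, c11, c12, c13, c14, c15, c16, c17]) = ecd2pid_alt (String.ofList [c1, c2, c3, c4, c5, c6, c7, c8, c9, c10, c11, c12, c13, c14, c15, c16, c17]) := by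
  have hr : PySem.List.pyRange 0 (17 : Int) 5 = [0, 5, 10, 15] := by decide
  simp [ecd2pid, ecd2pid_alt, pvHashtab, pvTab, hr, PySem.List.enumerate_cons, PySem.List.enumerate_nil,
    PySem.Int.floordiv, PySem.Dict.get?, PySem.Dict.insert, PySem.Dict.empty, PySem.List.pyGet?,
    PySem.List.pyIdx?, PySem.List.slice, PySem.List.clampIdx, pvShift_eq]

theorem pvCase18 (c1 c2 c3 c4 c5 c6 c7 c8 c9 c10 c11 c12 c13 c14 c15 c16 c17 c18 : Char) :
    ecd2pid (String.ofList [c1, c2, c3, c4, c5, c6, c7, c8, c9, c10, c11, c12, c13, c14, c15, c16, c17, c18]) = ecd2pid_alt (String.ofList [c1, c2, c3, c4, c5, c6, c7, c8, c9, c10, c11, c12, c13, c14, c15, c16, c17, c18]) := by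
  have hr : PySem.List.pyRange 0 (18 : Int) 5 = [0, 5, 10, 15] := by decide
  simp [ecd2pid, ecd2pid_alt, pvHashtab, pvTab, hr, PySem.List.enumerate_cons, PySem.List.enumerate_nil,
    PySem.Int.floordiv, PySem.Dict.get?, PySem.Dict.insert, PySem.Dict.empty, PySem.List.pyGet?,
    PySem.List.pyIdx?, PySem.List.slice, PySem.List.clampIdx, pvShift_eq]

theorem pvCase19 (c1 c2 c3 c4 c5 c6 c7 c8 c9 c10 c11 c12 c13 c14 c15 c16 c17 c18 c19 : Char) :
    ecd2pid (String.ofList [c1, c2, c3, c4, c5, c6, c7, c8, c9, c10, c11, c12, c13, c14, c15, c16, c17, c18, c19]) = ecd2pid_alt (String.ofList [c1, c2, c3, c4, c5, c6, c7, c8, c9, c10, c11, c12, c13, c14, c15, c16, c17, c18, c19]) := by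
  have hr : PySem.List.pyRange 0 (19 : Int) 5 = [0, 5, 10, 15] := by decide
  simp [ecd2pid, ecd2pid_alt, pvHashtab, pvTab, hr, PySem.List.enumerate_cons, PySem.List.enumerate_nil,
    PySem.Int.floordiv, PySem.Dict.get?, PySem.Dict.insert, PySem.Dict.empty, PySem.List.pyGet?,
    PySem.List.pyIdx?, PySem.List.slice, PySem.List.clampIdx, pvShift_eq]

theorem pvCase20 (c1 c2 c3 c4 c5 c6 c7 c8 c9 c10 c11 c12 c13 c14 c15 c16 c17 c18 c19 c20 : Char) :
    ecd2pid (String.ofList [c1, c2, c3, c4, c5, c6, c7, c8, c9, c10, c11, c12, c13, c14, c15, c16, c17, c18, c19, c20]) = ecd2pid_alt (String.ofList [c1, c2, c3, c4, c5, c6, c7, c8, c9, c10, c11, c12, c13, c14, c15, c16, c17, c18, c19, c20]) := by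
  have hr : PySem.List.pyRange 0 (20 : Int) 5 = [0, 5, 10, 15] := by decide
  simp [ecd2pid, ecd2pid_alt, pvHashtab, pvTab, hr, PySem.List.enumerate_cons, PySem.List.enumerate_nil,
    PySem.Int.floordiv, PySem.Dict.get?, PySem.Dict.insert, PySem.Dict.empty, PySem.List.pyGet?,
    PySem.List.pyIdx?, PySem.List.slice, PySem.List.clampIdx, pvShift_eq]

theorem pvMain (l : List Char) (h : l.length ≤ 20) :
    ecd2pid (String.ofList l) = ecd2pid_alt (String.ofList l) :=
  match l, h with
  | [], _ => pvCase0
  | [c1], _ => pvCase1 c1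
  | [c1, c2], _ => pvCase2 c1 c2
  | [c1, c2, c3], _ => pvCase3 c1 c2 c3
  | [c1, c2, c3, c4], _ => pvCase4 c1 c2 c3 c4
  | [c1, c2, c3, c4, c5], _ => pvCase5 c1 c2 c3 c4 c5
  | [c1, c2, c3, c4, c5, c6], _ => pvCase6 c1 c2 c3 c4 c5 c6
  | [c1, c2, c3, c4, c5, c6, c7], _ => pvCase7 c1 c2 c3 c4 c5 c6 c7
  | [c1, c2, c3, c4, c5, c6, c7, c8], _ => pvCase8 c1 c2 c3 c4 c5 c6 c7 c8
  | [c1, c2, c3, c4, c5, c6, c7, c8, c9], _ => pvCase9 c1 c2 c3 c4 c5 c6 c7 c8 c9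
  | [c1, c2, c3, c4, c5, c6, c7, c8, c9, c10], _ => pvCase10 c1 c2 c3 c4 c5 c6 c7 c8 c9 c10
  | [c1, c2, c3, c4, c5, c6, c7, c8, c9, c10, c11], _ => pvCase11 c1 c2 c3 c4 c5 c6 c7 c8 c9 c10 c11
  | [c1, c2, c3, c4, c5, c6, c7, c8, c9, c10, c11, c12], _ => pvCase12 c1 c2 c3 c4 c5 c6 c7 c8 c9 c10 c11 c12
  | [c1, c2, c3, c4, c5, c6, c7, c8, c9, c10, c11, c12, c13], _ => pvCase13 c1 c2 c3 c4 c5 c6 c7 c8 c9 c10 c11 c12 c13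
  | [c1, c2, c3, c4, c5, c6, c7, c8, c9, c10, c11, c12, c13, c14], _ => pvCase14 c1 c2 c3 c4 c5 c6 c7 c8 c9 c10 c11 c12 c13 c14
  | [c1, c2, c3, c4, c5, c6, c7, c8, c9, c10, c11, c12, c13, c14, c15], _ => pvCase15 c1 c2 c3 c4 c5 c6 c7 c8 c9 c10 c11 c12 c13 c14 c15
  | [c1, c2, c3, c4, c5, c6, c7, c8, c9, c10, c11, c12, c13, c14, c15, c16], _ => pvCase16 c1 c2 c3 c4 c5 c6 c7 c8 c9 c10 c11 c12 c13 c14 c15 c16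
  | [c1, c2, c3, c4, c5, c6, c7, c8, c9, c10, c11, c12, c13, c14, c15, c16, c17], _ => pvCase17 c1 c2 c3 c4 c5 c6 c7 c8 c9 c10 c11 c12 c13 c14 c15 c16 c17
  | [c1, c2, c3, c4, c5, c6, c7, c8, c9, c10, c11, c12, c13, c14, c15, c16, c17, c18], _ => pvCase18 c1 c2 c3 c4 c5 c6 c7 c8 c9 c10 c11 c12 c13 c14 c15 c16 c17 c18
  | [c1, c2, c3, c4, c5, c6, c7, c8, c9, c10, c11, c12, c13, c14, c15, c16, c17, c18, c19], _ => pvCase19 c1 c2 c3 c4 c5 c6 c7 c8 c9 c10 c11 c12 c13 c14 c15 c16 c17 c18 c19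
  | [c1, c2, c3, c4, c5, c6, c7, c8, c9, c10, c11, c12, c13, c14, c15, c16, c17, c18, c19, c20], _ => pvCase20 c1 c2 c3 c4 c5 c6 c7 c8 c9 c10 c11 c12 c13 c14 c15 c16 c17 c18 c19 c20
  | c1 :: c2 :: c3 :: c4 :: c5 :: c6 :: c7 :: c8 :: c9 :: c10 :: c11 :: c12 :: c13 :: c14 :: c15 :: c16 :: c17 :: c18 :: c19 :: c20 :: c21 :: rest, h => by simp [List.length] at h; omega

-- ===== VERDICT (by name: the statement is the Claim_ definition above) =====
theorem ecd2pid_spec : Claim_equal_ecd2pid := by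
  intro ecd _ hpre
  unfold Spec_ecd2pid
  have h := pvMain ecd.toList hpre
  simpa using h
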